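-- pv_equiv track=rewrite | github.com/paulamib123/Google-CodeJam | revEngineer.py | revEngineer
-- ===== SOURCE A (Python) =====
-- def revEngineer(n, perm, expectedCost):
--     perm = list(perm)
--     minValIndex = 0
--     minVal = perm[0]
--     cost = 0;
--
--     for i in range(0,n - 1):
--
--         minValIndex = i
--         minVal = perm[i]
--
--         for j in range(i, n):
--             if (minVal > perm[j]):
--                 minVal = perm[j]
--                 minValIndex = j;
--
--         cost += (minValIndex - i + 1)
--         perm = perm[:i] + perm[i : minValIndex + 1][::-1] + perm[minValIndex + 1:]
--     return cost == expectedCost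
-- ===== SOURCE B (Python) =====
-- def revEngineer(n, perm, expectedCost):
--     rest = list(perm[:n])
--     cost = 0
--     for _ in range(n - 1):
--         k = rest.index(min(rest))
--         cost += k + 1
--         rest = rest[:k][::-1] + rest[k+1:]
--     return cost == expectedCost
-- ===== Notes on version B (the rewrite author's own statement) =====
-- stated objective: simpler
-- what changed: B replaces A's whole-list simulation (manual inner min-scan over indices i..n-1 plus three-slice splicing of the full list each round) by a recursion on the unsorted suffix alone, using min()/index() and dropping the placed head each step.
import Mathlib
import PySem

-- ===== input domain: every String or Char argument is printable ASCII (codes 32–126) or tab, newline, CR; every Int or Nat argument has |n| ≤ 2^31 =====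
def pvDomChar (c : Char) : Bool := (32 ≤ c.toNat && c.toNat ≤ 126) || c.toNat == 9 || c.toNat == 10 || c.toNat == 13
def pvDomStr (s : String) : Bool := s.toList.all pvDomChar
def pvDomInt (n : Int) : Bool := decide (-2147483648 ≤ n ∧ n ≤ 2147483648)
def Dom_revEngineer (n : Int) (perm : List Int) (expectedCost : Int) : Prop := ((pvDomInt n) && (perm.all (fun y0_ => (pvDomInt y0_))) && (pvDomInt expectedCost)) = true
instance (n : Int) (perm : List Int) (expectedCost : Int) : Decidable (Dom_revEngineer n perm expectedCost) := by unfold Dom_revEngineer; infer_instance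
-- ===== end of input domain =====

-- B replaces A's index-bookkeeping simulation (slicing the full list at Int indices each round,
-- with a manual inner scan for the running minimum) by a recursion on the unsorted suffix alone,
-- using min/index on that suffix; objective: simpler (same O(n^2) cost).

-- ===== PORT A =====
-- inner 'for j in range(i, n)' scan for the running minimum and its index
def revInnerA (perm : List Int) (i n : Int) : Int × Int :=
  (PySem.List.pyRange i n 1).foldl
    (fun st j =>
      let v := PySem.List.pyGetD perm j 0
      if st.1 > v then (v, j) else st)
    (PySem.List.pyGetD perm i 0, i)

-- one iteration of the outer 'for i in range(0, n - 1)' loop: state (perm, cost)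
def revStepA (n : Int) (st : List Int × Int) (i : Int) : List Int × Int :=
  let mv := revInnerA st.1 i n
  (PySem.List.slice st.1 none (some i) ++
     (PySem.List.slice st.1 (some i) (some (mv.2 + 1))).reverse ++
     PySem.List.slice st.1 (some (mv.2 + 1)) none,
   st.2 + (mv.2 - i + 1))

def revEngineer (n : Int) (perm : List Int) (expectedCost : Int) : Bool :=
  (((PySem.List.pyRange 0 (n - 1) 1).foldl (revStepA n) (perm, 0)).2 == expectedCost)

-- ===== PORT B =====
-- 'for _ in range(n - 1)' as structural recursion on the iteration count;
-- min(rest) / rest.index(..) raise on an empty rest in Python — outside Pre_ rest is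
-- never empty here, so the .getD defaults are never read on admitted inputs.
def revLoopB : Nat → List Int → Int → Int
  | 0, _, cost => cost
  | t + 1, rest, cost =>
      let m := (PySem.List.min? rest (fun x => x)).getD 0
      let k := (PySem.List.index? rest m).getD 0
      revLoopB t ((rest.take k).reverse ++ rest.drop (k + 1)) (cost + ((k : Int) + 1))

def revEngineer_alt (n : Int) (perm : List Int) (expectedCost : Int) : Bool :=
  (revLoopB (n - 1).toNat (PySem.List.slice perm none (some n)) 0 == expectedCost)

-- ===== PRECONDITION & SPEC =====
-- A reads perm[0] and scans perm[i] for i < n: it raises IndexError exactly when perm is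
-- empty or n exceeds len(perm); those inputs are excluded.
def Pre_revEngineer (n : Int) (perm : List Int) (expectedCost : Int) : Prop :=
  perm ≠ [] ∧ n ≤ perm.length
instance (n : Int) (perm : List Int) (expectedCost : Int) : Decidable (Pre_revEngineer n perm expectedCost) := by unfold Pre_revEngineer; infer_instance

def pvWitness_revEngineer : Int × List Int × Int := (4, [3, 1, 2, 4], 5)

def Spec_revEngineer (n : Int) (perm : List Int) (expectedCost : Int) (out : Bool) : Prop := out = revEngineer_alt n perm expectedCost
instance (n : Int) (perm : List Int) (expectedCost : Int) (out : Bool) : Decidable (Spec_revEngineer n perm expectedCost out) := by unfold Spec_revEngineer; infer_instance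

-- ===== CLAIM (what is proved, stated in full; the proofs are below) =====
def Claim_equal_revEngineer : Prop := ∀ (n : Int) (perm : List Int) (expectedCost : Int), Dom_revEngineer n perm expectedCost → Pre_revEngineer n perm expectedCost → Spec_revEngineer n perm expectedCost (revEngineer n perm expectedCost)

-- ===== LEMMAS AND PROOFS =====

-- proof-side mirror of A's inner scan, recursing on the scanned segment
def runMin : List Int → Int → Int × Int → Int × Int
  | [], _, st => st
  | v :: t, a, st => runMin t (a + 1) (if st.1 > v then (v, a) else st)

theorem foldl_min_swap (t : List Int) : ∀ v w : Int, t.foldl min (min v w) = min v (t.foldl min w) := by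
  induction t with
  | nil => intro v w; simp
  | cons h t ih =>
      intro v w
      simp only [List.foldl_cons]
      rw [min_assoc, ih]

theorem L1 (perm : List Int) : ∀ (L a : Nat) (st : Int × Int), a + L ≤ perm.length →
    (PySem.List.pyRange (a : Int) ((a : Int) + (L : Int)) 1).foldl
      (fun st j =>
        let v := PySem.List.pyGetD perm j 0
        if st.1 > v then (v, j) else st) st
    = runMin ((perm.drop a).take L) (a : Int) st := by
  intro L
  induction L with
  | zero =>
      intro a st _
      simp [PySem.List.pyRange_one_eq_nil, runMin]
  | succ L ih =>
      intro a st hlen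
      have ha : (a : Int) < (a : Int) + ((L : Nat) + 1 : Nat) := by push_cast; omega
      rw [PySem.List.pyRange_one_cons ha]
      have haL : a < perm.length := by omega
      have hdrop : perm.drop a = perm[a] :: perm.drop (a + 1) := List.drop_eq_getElem_cons haL
      rw [hdrop]
      simp only [List.foldl_cons, List.take_succ_cons, runMin]
      have hget : PySem.List.pyGetD perm (a : Int) 0 = perm[a] := by
        simp [PySem.List.pyGetD_natCast, List.getD_eq_getElem?_getD, haL]
      rw [hget]
      have := ih (a + 1) (if st.1 > perm[a] then (perm[a], (a:Int)) else st) (by omega)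
      have hc1 : ((a : Int) + 1) = ((a + 1 : Nat) : Int) := by push_cast; ring
      have hc2 : (a : Int) + ((L + 1 : Nat) : Int) = ((a + 1 : Nat) : Int) + (L : Int) := by push_cast; ring
      rw [hc1, hc2, this]

theorem L2 (xs : List Int) : ∀ (a mv mi : Int),
    runMin xs a (mv, mi) =
      match PySem.List.min? xs (fun x => x) with
      | none => (mv, mi)
      | some m => if m < mv then (m, a + ((PySem.List.index? xs m).getD 0 : Nat)) else (mv, mi) := by
  induction xs with
  | nil => intro a mv mi; simp [runMin, PySem.List.min?]
  | cons v t ih =>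
      intro a mv mi
      rw [PySem.List.min?_id_cons]
      simp only [runMin]
      by_cases hvm : mv > v
      · simp only [if_pos hvm]
        rw [ih]
        cases ht : PySem.List.min? t (fun x => x) with
        | none =>
            have ht' : t = [] := (PySem.List.min?_eq_none_iff _ _).mp ht
            subst ht'
            simp only [List.foldl_nil]
            rw [if_pos hvm]
            rw [PySem.List.index?_cons_self]
            simp
        | some mt =>
            obtain ⟨h2, t2, rfl⟩ : ∃ h2 t2, t = h2 :: t2 := by
              cases t with
              | nil => simp [PySem.List.min?] at ht
              | cons a b => exact ⟨a, b, rfl⟩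
            rw [PySem.List.min?_id_cons] at ht
            injection ht with ht
            have hfold : (h2 :: t2).foldl min v = min v (t2.foldl min h2) := by
              have := foldl_min_swap t2 v h2
              simpa using this
            rw [hfold, ht]
            dsimp only
            by_cases hmt : mt < v
            · rw [if_pos hmt, min_eq_right (le_of_lt hmt), if_pos (lt_trans hmt hvm)]
              have hne : v ≠ mt := (ne_of_gt hmt)
              rw [PySem.List.index?_cons_of_ne _ hne]
              have hmem : mt ∈ h2 :: t2 := PySem.List.min?_mem (by rw [PySem.List.min?_id_cons, ht])
              obtain ⟨kk, hkk⟩ := (PySem.List.index?_isSome_iff (h2 :: t2) mt).mpr hmem |> Option.isSome_iff_exists.mp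
              rw [hkk]
              simp only [Option.map_some, Option.getD_some]
              simp only [Prod.mk.injEq, true_and]
              push_cast
              ring
            · rw [if_neg hmt, min_eq_left (le_of_not_gt hmt), if_pos hvm]
              rw [PySem.List.index?_cons_self]
              simp
      · simp only [if_neg hvm]
        rw [ih]
        have hvmv : v ≥ mv := le_of_not_gt hvm
        cases ht : PySem.List.min? t (fun x => x) with
        | none =>
            have ht' : t = [] := (PySem.List.min?_eq_none_iff _ _).mp ht
            subst ht'
            simp only [List.foldl_nil]
            rw [if_neg (by omega)]
        | some mt =>
            obtain ⟨h2, t2, rfl⟩ : ∃ h2 t2, t = h2 :: t2 := by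
              cases t with
              | nil => simp [PySem.List.min?] at ht
              | cons a b => exact ⟨a, b, rfl⟩
            rw [PySem.List.min?_id_cons] at ht
            injection ht with ht
            have hfold : (h2 :: t2).foldl min v = min v (t2.foldl min h2) := by
              have := foldl_min_swap t2 v h2
              simpa using this
            rw [hfold, ht]
            dsimp only
            by_cases hmt : mt < mv
            · have hmtv : mt < v := by omega
              rw [if_pos hmt, min_eq_right (le_of_lt hmtv), if_pos hmt]
              have hne : v ≠ mt := (ne_of_gt hmtv)
              rw [PySem.List.index?_cons_of_ne _ hne]
              have hmem : mt ∈ h2 :: t2 := PySem.List.min?_mem (by rw [PySem.List.min?_id_cons, ht])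
              obtain ⟨kk, hkk⟩ := (PySem.List.index?_isSome_iff (h2 :: t2) mt).mpr hmem |> Option.isSome_iff_exists.mp
              rw [hkk]
              simp only [Option.map_some, Option.getD_some]
              simp only [Prod.mk.injEq, true_and]
              push_cast
              ring
            · rw [if_neg hmt]
              rw [if_neg (by
                intro hlt
                exact hmt (by
                  have : min v mt ≤ mt := min_le_right _ _
                  omega))]

theorem inner_spec (perm : List Int) (a L : Nat) (hL : 0 < L) (hlen : a + L ≤ perm.length) :
    revInnerA perm (a : Int) ((a : Int) + (L : Int)) =
      (((PySem.List.min? ((perm.drop a).take L) (fun x => x)).getD 0),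
       (a : Int) + ((PySem.List.index? ((perm.drop a).take L)
          ((PySem.List.min? ((perm.drop a).take L) (fun x => x)).getD 0)).getD 0 : Nat)) := by
  have haL : a < perm.length := by omega
  obtain ⟨Lp, rfl⟩ : ∃ Lp, L = Lp + 1 := ⟨L - 1, by omega⟩
  have hdrop : perm.drop a = perm[a] :: perm.drop (a + 1) := List.drop_eq_getElem_cons haL
  have hseg : (perm.drop a).take (Lp + 1) = perm[a] :: (perm.drop (a + 1)).take Lp := by
    rw [hdrop]; rfl
  have hget : PySem.List.pyGetD perm (a : Int) 0 = perm[a] := by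
    simp [PySem.List.pyGetD_natCast, List.getD_eq_getElem?_getD, haL]
  unfold revInnerA
  rw [L1 perm (Lp + 1) a _ hlen, hseg, L2]
  rw [PySem.List.min?_id_cons]
  dsimp only
  set m := List.foldl min perm[a] ((perm.drop (a + 1)).take Lp) with hm
  have hmle : m ≤ perm[a] := by
    have := PySem.List.min?_isMin (xs := perm[a] :: (perm.drop (a + 1)).take Lp)
      (key := fun x => x) (m := m) (by rw [PySem.List.min?_id_cons])
    exact this perm[a] List.mem_cons_self
  rw [hget]
  by_cases hlt : m < perm[a]
  · rw [if_pos hlt]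
    simp
  · rw [if_neg hlt]
    have heq : m = perm[a] := le_antisymm hmle (le_of_not_gt hlt)
    rw [Option.getD_some, ← heq, PySem.List.index?_cons_self]
    simp

theorem outer_loop (n : Int) : ∀ (t : Nat) (perm : List Int) (a : Nat) (cost : Int),
    (a : Int) + (t : Int) + 1 = n → a + t + 1 ≤ perm.length →
    ((PySem.List.pyRange (a : Int) (n - 1) 1).foldl (revStepA n) (perm, cost)).2
      = revLoopB t ((perm.drop a).take (t + 1)) cost := by
  intro t
  induction t with
  | zero =>
      intro perm a cost hn hlen
      rw [PySem.List.pyRange_one_eq_nil (by omega)]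
      rfl
  | succ t ih =>
      intro perm a cost hn hlen
      -- abbreviations
      set seg := (perm.drop a).take (t + 1 + 1) with hsegdef
      have hseglen : seg.length = t + 2 := by
        simp [hsegdef]; omega
      have hsegne : seg ≠ [] := by
        intro h; rw [h] at hseglen; simp at hseglen
      obtain ⟨m, hm⟩ : ∃ m, PySem.List.min? seg (fun x => x) = some m := by
        cases hmo : PySem.List.min? seg (fun x => x) with
        | none => exact absurd ((PySem.List.min?_eq_none_iff _ _).mp hmo) hsegne
        | some m => exact ⟨m, rfl⟩
      have hmmem : m ∈ seg := PySem.List.min?_mem hm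
      obtain ⟨k, hk⟩ : ∃ k, PySem.List.index? seg m = some k :=
        Option.isSome_iff_exists.mp ((PySem.List.index?_isSome_iff seg m).mpr hmmem)
      have hklt : k < t + 2 := by
        obtain ⟨pre, suf, hps, hpre, _⟩ := (PySem.List.index?_eq_some_iff seg m k).mp hk
        have := congrArg List.length hps
        simp at this
        omega
      -- the inner scan
      have hinner : revInnerA perm (a : Int) n = (m, (a : Int) + (k : Nat)) := by
        have hcast : n = (a : Int) + ((t + 2 : Nat) : Int) := by push_cast; omega
        rw [hcast, inner_spec perm a (t + 2) (by omega) (by omega)]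
        rw [show ((t:Nat) + 2) = t + 1 + 1 from rfl, ← hsegdef, hm]
        simp only [Option.getD_some]
        rw [hk]
        simp only [Option.getD_some]
      -- decompose the step
      have hstep : revStepA n (perm, cost) (a : Int) =
          (perm.take a ++ ((perm.drop a).take (k + 1)).reverse ++ perm.drop (a + k + 1),
           cost + ((k : Int) + 1)) := by
        unfold revStepA
        rw [hinner]
        dsimp only
        congr 1
        · congr 1
          · congr 1
            · exact PySem.List.slice_to_natCast perm a
            · congr 1
              rw [show ((a : Int) + (k : Nat) + 1) = ((a : Int) + ((k + 1 : Nat) : Int)) by push_cast; ring]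
              exact PySem.List.slice_natCast_add perm a (k + 1)
          · rw [show ((a : Int) + (k : Nat) + 1) = (((a + k + 1 : Nat) : Int)) by push_cast; ring]
            exact PySem.List.slice_from_natCast perm (a + k + 1)
        · ring
      set perm' := perm.take a ++ ((perm.drop a).take (k + 1)).reverse ++ perm.drop (a + k + 1) with hperm'
      -- structure of perm
      have hTsplit : perm.drop a = seg ++ perm.drop (a + (t + 2)) := by
        rw [hsegdef]
        rw [show a + (t + 2) = a + (t + 1 + 1) from rfl, ← List.drop_drop]
        exact (List.take_append_drop _ _).symm
      have htk : (perm.drop a).take (k + 1) = seg.take (k + 1) := by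
        rw [hsegdef, List.take_take, Nat.min_eq_left (by omega)]
      have hdk : perm.drop (a + k + 1) = seg.drop (k + 1) ++ perm.drop (a + (t + 2)) := by
        rw [show a + k + 1 = a + (k + 1) by ring, ← List.drop_drop, hTsplit,
          List.drop_append_of_le_length (by omega)]
      have hlen' : perm'.length = perm.length := by
        simp [hperm']
        omega
      -- the next unsorted suffix
      have hrest : (perm'.drop (a + 1)).take (t + 1) = (seg.take k).reverse ++ seg.drop (k + 1) := by
        have hdropa : perm'.drop a = ((perm.drop a).take (k + 1)).reverse ++ perm.drop (a + k + 1) := by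
          rw [hperm', List.append_assoc, List.drop_append_of_le_length (by simp; omega)]
          simp
        have hksucc : seg.take (k + 1) = seg.take k ++ [seg[k]'(by omega)] := by
          rw [List.take_add_one]
          simp [List.getElem?_eq_getElem (by omega : k < seg.length)]
        rw [← List.drop_drop, hdropa, htk, hksucc, hdk]
        rw [List.reverse_append]
        simp only [List.reverse_singleton, List.cons_append,
          List.drop_succ_cons, List.drop_zero]
        rw [← List.append_assoc]
        rw [List.take_append_of_le_length (by simp [hseglen]; omega)]
        rw [List.take_of_length_le (by simp [hseglen]; omega)]
        simp
      -- peel the loop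
      rw [PySem.List.pyRange_one_cons (by omega), List.foldl_cons, hstep]
      have hc1 : ((a : Int) + 1) = ((a + 1 : Nat) : Int) := by push_cast; ring
      rw [hc1, ih perm' (a + 1) (cost + ((k : Int) + 1)) (by push_cast; push_cast at hn; omega) (by omega)]
      rw [hrest]
      -- unfold one step of revLoopB on the right
      conv_rhs => rw [revLoopB]
      rw [hm]
      simp only [Option.getD_some]
      rw [hk]
      simp only [Option.getD_some]

-- ===== VERDICT (by name: the statement is the Claim_ definition above) =====
theorem revEngineer_spec : Claim_equal_revEngineer := by
  intro n perm expectedCost _ hpre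
  unfold Spec_revEngineer revEngineer revEngineer_alt
  obtain ⟨hne, hlen⟩ := hpre
  by_cases h1 : n ≤ 1
  · rw [PySem.List.pyRange_one_eq_nil (by omega), show (n - 1).toNat = 0 by omega]
    rfl
  · set t := (n - 1).toNat with htdef
    have ht : (t : Int) = n - 1 := Int.toNat_of_nonneg (by omega)
    have hlenN : 0 + t + 1 ≤ perm.length := by omega
    have hA := outer_loop n t perm 0 0 (by push_cast; omega) hlenN
    rw [show ((0 : Nat) : Int) = (0 : Int) from rfl, List.drop_zero] at hA
    rw [hA, PySem.List.slice_to perm (by omega : (0:Int) ≤ n), show n.toNat = t + 1 by omega]
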